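-- pv_equiv track=rewrite | github.com/ColHoraceGentleman/ose-character-creator | src/equipment.py | best_affordable_armour
-- ===== SOURCE A (Python) =====
-- ARMOUR = {
--     "Leather":    {"aac": 12, "cost": 20, "encumbrance": 1},  # Light armour = 1 item
--     "Chainmail":  {"aac": 14, "cost": 40, "encumbrance": 2},  # Heavy armour = 2 items
--     "Plate mail": {"aac": 16, "cost": 60, "encumbrance": 2},  # Heavy armour = 2 items
--     "Shield":     {"aac_bonus": 1, "cost": 10, "encumbrance": 1},
-- }
--
-- CLASS_ARMOUR_RULES = {
--     "Cleric":      {"can_wear": ["Leather", "Chainmail", "Plate mail"], "can_use_shield": True},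
--     "Dwarf":       {"can_wear": ["Leather", "Chainmail", "Plate mail"], "can_use_shield": True},
--     "Elf":         {"can_wear": ["Leather", "Chainmail", "Plate mail"], "can_use_shield": True},
--     "Fighter":     {"can_wear": ["Leather", "Chainmail", "Plate mail"], "can_use_shield": True},
--     "Halfling":    {"can_wear": ["Leather", "Chainmail", "Plate mail"], "can_use_shield": True},
--     "Magic-User":  {"can_wear": [], "can_use_shield": False},
--     "Thief":       {"can_wear": ["Leather"], "can_use_shield": False},
-- }
--
-- def best_affordable_armour(char_class: str, gold: int) -> tuple:
--     """Return (armour_name, cost) for best armour affordable, or (None, 0)."""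
--     allowed = CLASS_ARMOUR_RULES[char_class]["can_wear"]
--     # Sort by AAC descending (higher = better)
--     options = sorted(
--         [(name, ARMOUR[name]) for name in allowed if ARMOUR[name]["cost"] <= gold],
--         key=lambda x: x[1]["aac"],
--         reverse=True  # Higher AAC = better protection
--     )
--     if options:
--         name, data = options[0]
--         return name, data["cost"]
--     return None, 0
-- ===== SOURCE B (Python) =====
-- ARMOUR = {
--     "Leather":    {"aac": 12, "cost": 20, "encumbrance": 1},
--     "Chainmail":  {"aac": 14, "cost": 40, "encumbrance": 2},
--     "Plate mail": {"aac": 16, "cost": 60, "encumbrance": 2},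
--     "Shield":     {"aac_bonus": 1, "cost": 10, "encumbrance": 1},
-- }
--
-- CLASS_ARMOUR_RULES = {
--     "Cleric":      {"can_wear": ["Leather", "Chainmail", "Plate mail"], "can_use_shield": True},
--     "Dwarf":       {"can_wear": ["Leather", "Chainmail", "Plate mail"], "can_use_shield": True},
--     "Elf":         {"can_wear": ["Leather", "Chainmail", "Plate mail"], "can_use_shield": True},
--     "Fighter":     {"can_wear": ["Leather", "Chainmail", "Plate mail"], "can_use_shield": True},
--     "Halfling":    {"can_wear": ["Leather", "Chainmail", "Plate mail"], "can_use_shield": True},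
--     "Magic-User":  {"can_wear": [], "can_use_shield": False},
--     "Thief":       {"can_wear": ["Leather"], "can_use_shield": False},
-- }
--
-- def best_affordable_armour(char_class: str, gold: int) -> tuple:
--     """Return (armour_name, cost) for best armour affordable, or (None, 0)."""
--     allowed = CLASS_ARMOUR_RULES[char_class]["can_wear"]
--     best_name, best_cost, best_aac = None, 0, None
--     for name in allowed:
--         data = ARMOUR[name]
--         if data["cost"] > gold:
--             continue
--         if best_aac is None or data["aac"] > best_aac:
--             best_name, best_cost, best_aac = name, data["cost"], data["aac"]
--     return best_name, best_cost
-- ===== Notes on version B (the rewrite author's own statement) =====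
-- stated objective: simpler
-- what changed: B replaces build-filtered-list + stable sort by AAC descending + take head with a single linear max-scan over the allowed list keeping (best_name, best_cost, best_aac) trackers.
import Mathlib
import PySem

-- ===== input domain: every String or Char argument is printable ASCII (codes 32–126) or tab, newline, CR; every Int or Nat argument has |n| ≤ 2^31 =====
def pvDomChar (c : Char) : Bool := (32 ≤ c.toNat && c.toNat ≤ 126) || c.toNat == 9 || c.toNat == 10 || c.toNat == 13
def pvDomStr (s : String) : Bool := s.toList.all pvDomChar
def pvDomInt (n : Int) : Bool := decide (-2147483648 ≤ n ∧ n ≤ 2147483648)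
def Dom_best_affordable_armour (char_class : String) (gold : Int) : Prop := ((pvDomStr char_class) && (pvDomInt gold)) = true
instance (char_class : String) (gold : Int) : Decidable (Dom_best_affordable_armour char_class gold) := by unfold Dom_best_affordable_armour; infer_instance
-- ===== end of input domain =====

-- B replaces sort-descending-then-head with a single linear max-scan; return-value equivalence on the seven known classes.

-- ===== PORT A =====
-- ARMOUR as (name, (aac, cost)); "Shield" is omitted: it has no "aac" entry and never occurs in any "can_wear" list, so A never reads it.
def pvARMOUR : PySem.Dict String (Int × Int) :=
  PySem.Dict.mk [("Leather", (12, 20)), ("Chainmail", (14, 40)), ("Plate mail", (16, 60))]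

def pvRULES : PySem.Dict String (List String) :=
  PySem.Dict.mk [("Cleric", ["Leather", "Chainmail", "Plate mail"]),
                 ("Dwarf", ["Leather", "Chainmail", "Plate mail"]),
                 ("Elf", ["Leather", "Chainmail", "Plate mail"]),
                 ("Fighter", ["Leather", "Chainmail", "Plate mail"]),
                 ("Halfling", ["Leather", "Chainmail", "Plate mail"]),
                 ("Magic-User", []),
                 ("Thief", ["Leather"])]

def best_affordable_armour (char_class : String) (gold : Int) : Option String × Int :=
  match PySem.Dict.get? pvRULES char_class with
  | none => (none, 0)  -- Python raises KeyError here; excluded by Pre_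
  | some allowed =>
    let options := PySem.List.sorted
      ((allowed.filter (fun n => (PySem.Dict.getD pvARMOUR n (0, 0)).2 ≤ gold)).map
        (fun n => (n, PySem.Dict.getD pvARMOUR n (0, 0))))
      (fun x => x.2.1) true
    match options with
    | (name, data) :: _ => (some name, data.2)
    | [] => (none, 0)

-- ===== PORT B =====
def best_affordable_armour_alt (char_class : String) (gold : Int) : Option String × Int :=
  match PySem.Dict.get? pvRULES char_class with
  | none => (none, 0)  -- Python raises KeyError here; excluded by Pre_
  | some allowed =>
    let st := allowed.foldl
      (fun (st : Option String × Int × Option Int) name =>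
        let data := PySem.Dict.getD pvARMOUR name (0, 0)
        if gold < data.2 then st
        else match st.2.2 with
          | none => (some name, data.2, some data.1)
          | some bestAac => if bestAac < data.1 then (some name, data.2, some data.1) else st)
      (none, 0, none)
    (st.1, st.2.1)

-- ===== PRECONDITION & SPEC =====
-- Pre_ excludes exactly the unknown classes, on which Python A (and B) raise KeyError.
def Pre_best_affordable_armour (char_class : String) (gold : Int) : Prop :=
  char_class ∈ ["Cleric", "Dwarf", "Elf", "Fighter", "Halfling", "Magic-User", "Thief"]
instance (char_class : String) (gold : Int) : Decidable (Pre_best_affordable_armour char_class gold) := by unfold Pre_best_affordable_armour; infer_instance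
def pvWitness_best_affordable_armour : String × Int := ("Fighter", 45)

def Spec_best_affordable_armour (char_class : String) (gold : Int) (out : Option String × Int) : Prop := out = best_affordable_armour_alt char_class gold
instance (char_class : String) (gold : Int) (out : Option String × Int) : Decidable (Spec_best_affordable_armour char_class gold out) := by unfold Spec_best_affordable_armour; infer_instance

-- ===== CLAIM (what is proved, stated in full; the proofs are below) =====
def Claim_equal_best_affordable_armour : Prop := ∀ (char_class : String) (gold : Int), Dom_best_affordable_armour char_class gold → Pre_best_affordable_armour char_class gold → Spec_best_affordable_armour char_class gold (best_affordable_armour char_class gold)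

-- ===== LEMMAS AND PROOFS =====
set_option maxHeartbeats 2000000 in
theorem pv_case (c : String) (gold : Int)
    (h : c ∈ ["Cleric", "Dwarf", "Elf", "Fighter", "Halfling", "Magic-User", "Thief"]) :
    best_affordable_armour c gold = best_affordable_armour_alt c gold := by
  simp only [List.mem_cons, List.not_mem_nil, or_false] at h
  rcases h with h | h | h | h | h | h | h <;> subst h <;>
    by_cases h1 : (20 : Int) ≤ gold <;> by_cases h2 : (40 : Int) ≤ gold <;>
    by_cases h3 : (60 : Int) ≤ gold <;>
    first
      | omega
      | (have e1 : ((gold : Int) < 20) ↔ ¬((20 : Int) ≤ gold) := not_le.symm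
         have e2 : ((gold : Int) < 40) ↔ ¬((40 : Int) ≤ gold) := not_le.symm
         have e3 : ((gold : Int) < 60) ↔ ¬((60 : Int) ≤ gold) := not_le.symm
         simp [best_affordable_armour, best_affordable_armour_alt, pvRULES, pvARMOUR,
           PySem.Dict.get?_mk_cons, PySem.List.sorted, PySem.List.insertBy, PySem.Dict.getD,
           e1, e2, e3, h1, h2, h3])

-- ===== VERDICT (by name: the statement is the Claim_ definition above) =====
theorem best_affordable_armour_spec : Claim_equal_best_affordable_armour := by
  intro c g _ hpre
  exact pv_case c g hpre
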